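-- pv_equiv track=rewrite | github.com/JakubAnderwald/drafto | scripts/recover-from-wal.py | make_dollar_tag
-- ===== SOURCE A (Python) =====
-- def make_dollar_tag(content: str) -> str:
--     """Pick a dollar-quote tag that doesn't appear in ``content``."""
--     base = "drafto_restore"
--     candidate = base
--     counter = 0
--     while f"${candidate}$" in content:
--         counter += 1
--         candidate = f"{base}_{counter}"
--     return candidate
-- ===== SOURCE B (Python) =====
-- def make_dollar_tag(content: str) -> str:
--     """Pick a dollar-quote tag that doesn't appear in ``content``.
--
--     One linear scan collects every complete dollar-quote-shaped chunk that
--     starts with the marker, then candidates are tested against that set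
--     instead of rescanning the content for each candidate.
--     """
--     marker = "$drafto_restore"
--     seen = set()
--     for p in range(len(content)):
--         if content[p:p + len(marker)] == marker:
--             j = content.find("$", p + len(marker))
--             if j != -1:
--                 seen.add(content[p:j + 1])
--     counter = 0
--     candidate = "drafto_restore"
--     while f"${candidate}$" in seen:
--         counter += 1
--         candidate = f"drafto_restore_{counter}"
--     return candidate
-- ===== Notes on version B (the rewrite author's own statement) =====
-- stated objective: alternative
-- what changed: Instead of rescanning the whole content with a substring search for every successive candidate tag, B makes one scan that collects every dollar-quote-shaped chunk starting with the marker into a set, then tests candidates against that set.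
import Mathlib
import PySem

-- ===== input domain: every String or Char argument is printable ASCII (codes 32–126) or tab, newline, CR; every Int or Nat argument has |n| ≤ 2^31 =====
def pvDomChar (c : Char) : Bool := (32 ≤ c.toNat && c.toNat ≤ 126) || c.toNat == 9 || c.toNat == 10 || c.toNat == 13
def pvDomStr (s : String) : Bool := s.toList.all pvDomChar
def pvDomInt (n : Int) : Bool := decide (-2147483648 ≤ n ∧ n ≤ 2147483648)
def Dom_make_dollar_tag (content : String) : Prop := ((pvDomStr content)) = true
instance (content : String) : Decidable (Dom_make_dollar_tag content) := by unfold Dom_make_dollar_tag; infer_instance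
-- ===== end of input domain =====

-- B replaces A's per-candidate rescan of the content by one scan collecting all
-- dollar-quote-shaped chunks into a set and testing candidates against that set
-- (objective: alternative algorithm, same result).

-- ===== PORT A =====
-- A's while loop, as fuel recursion; the fuel (content length + 1) is only a
-- termination device: it is proved sufficient below (pvLoopA_spec + pvExists_N),
-- so the port behaves as Python's unbounded loop on every input.
def pvLoopA (content : String) : Nat → Int → String → String
  | 0, _, cand => cand
  | f + 1, counter, cand =>
    if PySem.Str.isIn ("$" ++ cand ++ "$") content then
      -- counter += 1; candidate = f"{base}_{counter}"
      pvLoopA content f (counter + 1) ("drafto_restore" ++ "_" ++ PySem.Int.toStr (counter + 1))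
    else cand

def make_dollar_tag (content : String) : String :=
  pvLoopA content (content.toList.length + 1) 0 "drafto_restore"

-- ===== PORT B =====
-- for p in range(len(content)): if content[p:p+15] == marker: j = content.find("$", p+15); if j != -1: seen.add(content[p:j+1])
def pvScanB (content : String) : PySem.Set String :=
  (List.range content.toList.length).foldl
    (fun (seen : PySem.Set String) (p : Nat) =>
      if PySem.Str.slice content (some (p : Int)) (some ((p : Int) + 15)) == "$drafto_restore" then
        let j := PySem.Str.findFrom content "$" ((p : Int) + 15) none
        if j ≠ -1 then
          PySem.Set.add seen (PySem.Str.slice content (some (p : Int)) (some (j + 1)))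
        else seen
      else seen)
    PySem.Set.empty

-- B's final while loop (same fuel device as A's port, proved sufficient below)
def pvLoopB (seen : PySem.Set String) : Nat → Int → String → String
  | 0, _, cand => cand
  | f + 1, counter, cand =>
    if PySem.Set.contains seen ("$" ++ cand ++ "$") then
      pvLoopB seen f (counter + 1) ("drafto_restore" ++ "_" ++ PySem.Int.toStr (counter + 1))
    else cand

def make_dollar_tag_alt (content : String) : String :=
  pvLoopB (pvScanB content) (content.toList.length + 1) 0 "drafto_restore"

-- ===== PRECONDITION & SPEC =====
def Spec_make_dollar_tag (content : String) (out : String) : Prop := out = make_dollar_tag_alt content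
instance (content : String) (out : String) : Decidable (Spec_make_dollar_tag content out) := by unfold Spec_make_dollar_tag; infer_instance

-- ===== CLAIM (what is proved, stated in full; the proofs are below) =====
def Claim_equal_make_dollar_tag : Prop := ∀ (content : String), Dom_make_dollar_tag content → Spec_make_dollar_tag content (make_dollar_tag content)

-- ===== LEMMAS AND PROOFS =====

-- the candidate string for counter c
def pvName (c : Nat) : String :=
  if c = 0 then "drafto_restore" else "drafto_restore" ++ "_" ++ PySem.Int.toStr (c : Int)

-- the middle part of the dollar tag for counter c, as characters
def pvMid (c : Nat) : List Char := if c = 0 then [] else '_' :: Nat.toDigits 10 c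

-- the full dollar tag for counter c, as characters
def pvTag (c : Nat) : List Char := '$' :: "drafto_restore".toList ++ (pvMid c ++ ['$'])

def pvMarker : List Char := '$' :: "drafto_restore".toList

-- counter c's tag occurs in the content
def pvPresent (s : List Char) (c : Nat) : Prop := pvTag c <:+: s

-- proof-side views of B's scan body
def pvJ (content : String) (p : Nat) : Int := PySem.Str.findFrom content "$" ((p : Int) + 15) none
def pvCond (content : String) (p : Nat) : Bool :=
  (PySem.Str.slice content (some (p : Int)) (some ((p : Int) + 15)) == "$drafto_restore") &&
    (pvJ content p != -1)
def pvChunk (content : String) (p : Nat) : String :=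
  PySem.Str.slice content (some (p : Int)) (some (pvJ content p + 1))

lemma pvTag_eq (c : Nat) : pvTag c = pvMarker ++ (pvMid c ++ ['$']) := rfl

lemma pvToList_tag (c : Nat) : ("$" ++ pvName c ++ "$").toList = pvTag c := by
  by_cases h : c = 0
  · subst h; rfl
  · simp [pvName, pvTag, pvMid, h, String.toList_append, PySem.Int.toStr, PySem.Int.toChars]

lemma pvTag_length (c : Nat) : (pvTag c).length = 16 + (pvMid c).length := by
  simp [pvTag]; omega

lemma pvMid_no_dollar (c : Nat) : ∀ ch ∈ pvMid c, ch ≠ '$' := by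
  intro ch hm
  by_cases h : c = 0
  · simp [pvMid, h] at hm
  · simp [pvMid, h] at hm
    rcases hm with rfl | hm
    · decide
    · have := Nat.isDigit_of_mem_toDigits (by norm_num) (by norm_num) hm
      intro he; subst he; simp [Char.isDigit] at this

lemma pvName_succ (k : Nat) :
    "drafto_restore" ++ "_" ++ PySem.Int.toStr ((k : Int) + 1) = pvName (k + 1) := by
  simp [pvName]

lemma pvDigitChar_inj : ∀ m < 10, ∀ n < 10, Nat.digitChar m = Nat.digitChar n → m = n := by decide

lemma pvToDigits_ge (m : Nat) (hm : 10 ≤ m) :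
    Nat.toDigits 10 m = Nat.toDigits 10 (m / 10) ++ [(m % 10).digitChar] := by
  rw [Nat.toDigits_eq_if (by norm_num), if_neg (by omega)]

lemma pvToDigits_lt (m : Nat) (hm : m < 10) : Nat.toDigits 10 m = [m.digitChar] := by
  rw [Nat.toDigits_eq_if (by norm_num), if_pos hm]

lemma pvToDigits_inj : ∀ m n : Nat, Nat.toDigits 10 m = Nat.toDigits 10 n → m = n := by
  intro m
  induction m using Nat.strong_induction_on with
  | _ m ih =>
    intro n h
    rcases Nat.lt_or_ge m 10 with hm | hm <;> rcases Nat.lt_or_ge n 10 with hn | hn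
    · rw [pvToDigits_lt m hm, pvToDigits_lt n hn] at h
      exact pvDigitChar_inj m hm n hn (by simpa using h)
    · exfalso
      rw [pvToDigits_lt m hm, pvToDigits_ge n hn] at h
      have hl := congrArg List.length h
      have := @Nat.length_toDigits_pos 10 (n / 10)
      simp only [List.length_append, List.length_cons, List.length_nil] at hl
      omega
    · exfalso
      rw [pvToDigits_ge m hm, pvToDigits_lt n hn] at h
      have hl := congrArg List.length h
      have := @Nat.length_toDigits_pos 10 (m / 10)
      simp only [List.length_append, List.length_cons, List.length_nil] at hl
      omega
    · rw [pvToDigits_ge m hm, pvToDigits_ge n hn] at h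
      obtain ⟨h1, h2⟩ := List.append_inj' h (by simp)
      have hdiv : m / 10 = n / 10 := ih (m / 10) (by omega) (n / 10) h1
      have hmod : m % 10 = n % 10 := by
        refine pvDigitChar_inj _ (Nat.mod_lt _ (by norm_num)) _ (Nat.mod_lt _ (by norm_num)) ?_
        simpa using h2
      omega

lemma pvMid_append_prefix {c c' : Nat}
    (h : pvMid c ++ ['$'] <+: pvMid c' ++ ['$']) : c = c' := by
  by_cases h0 : c = 0 <;> by_cases h0' : c' = 0
  · omega
  · exfalso
    rw [pvMid, if_pos h0, pvMid, if_neg h0', List.nil_append, List.cons_append,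
        List.cons_prefix_cons] at h
    exact absurd h.1 (by decide)
  · exfalso
    rw [pvMid, if_neg h0, pvMid, if_pos h0', List.nil_append, List.cons_append,
        List.cons_prefix_cons] at h
    exact absurd h.1 (by decide)
  · rw [pvMid, if_neg h0, pvMid, if_neg h0', List.cons_append, List.cons_append,
        List.cons_prefix_cons] at h
    obtain ⟨-, h⟩ := h
    set D := Nat.toDigits 10 c with hD
    set D' := Nat.toDigits 10 c' with hD'
    have hlen : D.length + 1 ≤ D'.length + 1 := by
      have := h.length_le; simpa using this
    rcases Nat.lt_or_ge D.length D'.length with hlt | hge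
    · exfalso
      have hg := h.getElem (i := D.length) (by simp)
      rw [List.getElem_append_right (by omega)] at hg
      simp at hg
      rw [List.getElem_append_left (by omega)] at hg
      have : D'[D.length] ≠ '$' := by
        have hm : D'[D.length] ∈ D' := List.getElem_mem _
        have := Nat.isDigit_of_mem_toDigits (b := 10) (by norm_num) (by norm_num) hm
        intro he; rw [he] at this; simp [Char.isDigit] at this
      exact this hg.symm
    · have heq : D ++ ['$'] = D' ++ ['$'] := h.eq_of_length (by simp; omega)
      obtain ⟨h1, -⟩ := List.append_inj' heq (by simp)
      exact pvToDigits_inj c c' h1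

lemma pvTag_prefix_inj {u : List Char} {c c' : Nat}
    (h : pvTag c <+: u) (h' : pvTag c' <+: u) : c = c' := by
  rcases List.prefix_or_prefix_of_prefix h h' with hp | hp
  · rw [pvTag, pvTag, List.prefix_append_right_inj] at hp
    exact pvMid_append_prefix hp
  · rw [pvTag, pvTag, List.prefix_append_right_inj] at hp
    exact (pvMid_append_prefix hp).symm

lemma pvPresent_iff_exists (s : List Char) (c : Nat) :
    pvPresent s c ↔ ∃ j, pvTag c <+: List.drop j s := by
  rw [pvPresent, ← PySem.Chars.isIn_iff_infix, ← PySem.Chars.exists_prefix_drop_iff_isIn]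

lemma pvExists_absent (s : List Char) : ∃ i, i ≤ s.length ∧ ¬ pvPresent s i := by
  by_contra hall
  push_neg at hall
  have hex : ∀ i : Fin (s.length + 1), ∃ j, pvTag i.val <+: List.drop j s := by
    intro i
    exact (pvPresent_iff_exists s i.val).mp (hall i.val (by omega))
  have hbound : ∀ i : Fin (s.length + 1), Nat.find (hex i) < s.length := by
    intro i
    have hp : pvTag i.val <+: List.drop (Nat.find (hex i)) s := Nat.find_spec (hex i)
    have h1 : 1 ≤ (pvTag i.val).length := by simp [pvTag]
    have h2 := hp.length_le
    rw [List.length_drop] at h2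
    omega
  have hinj : Function.Injective (fun i : Fin (s.length + 1) =>
      (⟨Nat.find (hex i), hbound i⟩ : Fin s.length)) := by
    intro i i' hik
    simp only [Fin.mk.injEq] at hik
    have h1 : pvTag i.val <+: List.drop (Nat.find (hex i)) s := Nat.find_spec (hex i)
    have h2 : pvTag i'.val <+: List.drop (Nat.find (hex i')) s := Nat.find_spec (hex i')
    rw [hik] at h1
    exact Fin.ext (pvTag_prefix_inj h1 h2)
  have := Fintype.card_le_of_injective _ hinj
  simp [Fintype.card_fin] at this

lemma pvExists_N (s : List Char) :
    ∃ N, N ≤ s.length ∧ (∀ i, i < N → pvPresent s i) ∧ ¬ pvPresent s N := by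
  obtain ⟨i, hi, hnp⟩ := pvExists_absent s
  letI : DecidablePred fun n => ¬ pvPresent s n := fun n => by unfold pvPresent; infer_instance
  have hex : ∃ i, ¬ pvPresent s i := ⟨i, hnp⟩
  refine ⟨Nat.find hex, le_trans (Nat.find_min' hex hnp) hi, ?_, Nat.find_spec hex⟩
  intro j hj
  have := Nat.find_min hex hj
  simpa using this

lemma pvLoopA_spec (content : String) (N : Nat)
    (hpres : ∀ i, i < N → pvPresent content.toList i)
    (habs : ¬ pvPresent content.toList N) :
    ∀ f k, k ≤ N → N < k + f →
      pvLoopA content f (k : Int) (pvName k) = pvName N := by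
  intro f
  induction f with
  | zero => intro k h1 h2; exfalso; omega
  | succ f ih =>
    intro k h1 h2
    rw [pvLoopA]
    have hiff : PySem.Str.isIn ("$" ++ pvName k ++ "$") content = true ↔
        pvPresent content.toList k := by
      rw [PySem.Str.isIn_iff_infix, pvToList_tag, pvPresent]
    rcases Nat.lt_or_ge k N with hk | hk
    · rw [if_pos (hiff.mpr (hpres k hk)), pvName_succ]
      rw [show (k : Int) + 1 = ((k + 1 : Nat) : Int) from by push_cast; ring]
      exact ih (k + 1) (by omega) (by omega)
    · have hkN : k = N := by omega
      subst hkN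
      rw [if_neg (fun hc => habs (hiff.mp hc))]

lemma pvLoopB_spec (seen : PySem.Set String) (content : String) (N : Nat)
    (hmem : ∀ c : Nat, (("$" ++ pvName c ++ "$") ∈ seen ↔ pvPresent content.toList c))
    (hpres : ∀ i, i < N → pvPresent content.toList i)
    (habs : ¬ pvPresent content.toList N) :
    ∀ f k, k ≤ N → N < k + f →
      pvLoopB seen f (k : Int) (pvName k) = pvName N := by
  intro f
  induction f with
  | zero => intro k h1 h2; exfalso; omega
  | succ f ih =>
    intro k h1 h2
    rw [pvLoopB]
    have hiff : PySem.Set.contains seen ("$" ++ pvName k ++ "$") = true ↔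
        pvPresent content.toList k := by
      rw [PySem.Set.contains_iff]
      exact hmem k
    rcases Nat.lt_or_ge k N with hk | hk
    · rw [if_pos (hiff.mpr (hpres k hk)), pvName_succ]
      rw [show (k : Int) + 1 = ((k + 1 : Nat) : Int) from by push_cast; ring]
      exact ih (k + 1) (by omega) (by omega)
    · have hkN : k = N := by omega
      subst hkN
      rw [if_neg (fun hc => habs (hiff.mp hc))]

lemma pvCond_iff (content : String) (p : Nat) :
    pvCond content p = true ↔
      (PySem.Str.slice content (some (p : Int)) (some ((p : Int) + 15)) == "$drafto_restore") = true ∧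
        pvJ content p ≠ -1 := by
  simp [pvCond, Bool.and_eq_true, bne_iff_ne]

lemma pvBody_eq (content : String) (seen : PySem.Set String) (p : Nat) :
    (if PySem.Str.slice content (some (p : Int)) (some ((p : Int) + 15)) == "$drafto_restore" then
        let j := PySem.Str.findFrom content "$" ((p : Int) + 15) none
        if j ≠ -1 then
          PySem.Set.add seen (PySem.Str.slice content (some (p : Int)) (some (j + 1)))
        else seen
      else seen)
    = if pvCond content p = true then PySem.Set.add seen (pvChunk content p) else seen := by
  by_cases h1 : (PySem.Str.slice content (some (p : Int)) (some ((p : Int) + 15)) == "$drafto_restore") = true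
  · rw [if_pos h1]
    show (if pvJ content p ≠ -1 then
            PySem.Set.add seen (PySem.Str.slice content (some (p : Int)) (some (pvJ content p + 1)))
          else seen) = _
    by_cases h2 : pvJ content p ≠ -1
    · rw [if_pos h2, if_pos ((pvCond_iff content p).mpr ⟨h1, h2⟩)]
      rfl
    · rw [if_neg h2, if_neg (fun hc => h2 ((pvCond_iff content p).mp hc).2)]
  · rw [if_neg h1, if_neg (fun hc => h1 ((pvCond_iff content p).mp hc).1)]

lemma pvMem_foldl_cond (C : Nat → Prop) [DecidablePred C] (g : Nat → String) (x : String) :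
    ∀ (ps : List Nat) (s0 : PySem.Set String),
      (x ∈ ps.foldl (fun seen p => if C p then PySem.Set.add seen (g p) else seen) s0
        ↔ x ∈ s0 ∨ ∃ p ∈ ps, C p ∧ x = g p) := by
  intro ps
  induction ps with
  | nil => intro s0; simp
  | cons q ps ih =>
    intro s0
    rw [List.foldl_cons, ih]
    by_cases hq : C q
    · rw [if_pos hq, PySem.Set.mem_add]
      constructor
      · rintro (⟨hs | hx⟩ | ⟨p, hp, hc, hx⟩)
        · exact Or.inl hs
        · exact Or.inr ⟨q, by simp, hq, hx⟩
        · exact Or.inr ⟨p, by simp [hp], hc, hx⟩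
      · rintro (hs | ⟨p, hp, hc, hx⟩)
        · exact Or.inl (Or.inl hs)
        · rcases List.mem_cons.mp hp with rfl | hp'
          · exact Or.inl (Or.inr hx)
          · exact Or.inr ⟨p, hp', hc, hx⟩
    · rw [if_neg hq]
      constructor
      · rintro (hs | ⟨p, hp, hc, hx⟩)
        · exact Or.inl hs
        · exact Or.inr ⟨p, by simp [hp], hc, hx⟩
      · rintro (hs | ⟨p, hp, hc, hx⟩)
        · exact Or.inl hs
        · rcases List.mem_cons.mp hp with rfl | hp'
          · exact absurd hc hq
          · exact Or.inr ⟨p, hp', hc, hx⟩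

lemma pvScanB_eq (content : String) :
    pvScanB content = (List.range content.toList.length).foldl
      (fun seen p => if pvCond content p = true then PySem.Set.add seen (pvChunk content p) else seen)
      PySem.Set.empty := by
  rw [pvScanB]
  apply List.foldl_ext
  intro seen p _
  exact pvBody_eq content seen p

lemma pvMem_scan_fold (content : String) (x : String) :
    x ∈ pvScanB content ↔
      ∃ p ∈ List.range content.toList.length, pvCond content p = true ∧ x = pvChunk content p := by
  rw [pvScanB_eq, pvMem_foldl_cond]
  simp [PySem.Set.empty]

lemma pvSingleton_prefix_iff (u : List Char) (ch : Char) :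
    [ch] <+: u ↔ u[0]? = some ch := by
  cases u with
  | nil => simp
  | cons a t => simp [List.cons_prefix_cons, eq_comm]

lemma pvTag_getElem? (s : List Char) (p c i : Nat)
    (htag : pvTag c <+: List.drop p s) (hi : i < (pvTag c).length) :
    s[p + i]? = (pvTag c)[i]? := by
  obtain ⟨t, ht⟩ := htag
  rw [← List.getElem?_drop, ← ht, List.getElem?_append_left hi]

lemma pvNoDollarAt (s : List Char) (p c q : Nat)
    (htag : pvTag c <+: List.drop p s)
    (h1 : p + 15 ≤ q) (h2 : q < p + 15 + (pvMid c).length) :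
    ¬ ['$'] <+: List.drop q s := by
  intro hpre
  rw [pvSingleton_prefix_iff, List.getElem?_drop, Nat.add_zero] at hpre
  have hi : q - p < (pvTag c).length := by rw [pvTag_length]; omega
  have he := pvTag_getElem? s p c (q - p) htag hi
  rw [show p + (q - p) = q from by omega, hpre] at he
  have hm15 : pvMarker.length = 15 := rfl
  rw [pvTag_eq, List.getElem?_append_right (by omega),
      List.getElem?_append_left (by rw [hm15]; omega), hm15] at he
  obtain ⟨hlt, hval⟩ := List.getElem?_eq_some_iff.mp he.symm
  exact pvMid_no_dollar c _ (List.getElem_mem _) hval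

lemma pvDollarAt (s : List Char) (p c : Nat)
    (htag : pvTag c <+: List.drop p s) :
    ['$'] <+: List.drop (p + 15 + (pvMid c).length) s := by
  have h := htag.drop (15 + (pvMid c).length)
  rw [List.drop_drop] at h
  rw [pvTag_eq] at h
  have he : List.drop (15 + (pvMid c).length) (pvMarker ++ (pvMid c ++ ['$'])) = ['$'] := by
    rw [← List.append_assoc]
    apply List.drop_left'
    simp [pvMarker]
    omega
  rw [he] at h
  rwa [show p + (15 + (pvMid c).length) = p + 15 + (pvMid c).length from by omega] at h

lemma pvJ_chars (content : String) (p : Nat) :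
    pvJ content p = PySem.Chars.findFrom content.toList ['$'] ((p + 15 : Nat) : Int) none := by
  rw [pvJ, PySem.Str.findFrom_eq, show ((p : Int) + 15) = ((p + 15 : Nat) : Int) from by push_cast; ring]
  rfl

lemma pvJ_eq (content : String) (p c : Nat)
    (htag : pvTag c <+: List.drop p content.toList)
    (hlen : p + 16 + (pvMid c).length ≤ content.toList.length) :
    pvJ content p = ((p + 15 + (pvMid c).length : Nat) : Int) := by
  set s := content.toList with hs
  set m := (pvMid c).length with hm
  have hk : p + 15 ≤ s.length := by omega
  have hdollar : ['$'] <+: List.drop (p + 15 + m) s := pvDollarAt s p c htag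
  have hne : PySem.Chars.findFrom s ['$'] ((p + 15 : Nat) : Int) none ≠ -1 := by
    rw [ne_eq, PySem.Chars.findFrom_natCast_eq_neg_one_iff s ['$'] (p + 15) hk]
    push_neg
    rw [← PySem.Chars.isIn_iff_infix, ← PySem.Chars.exists_prefix_drop_iff_isIn]
    exact ⟨m, by rwa [List.drop_drop, show (p + 15) + m = p + 15 + m from rfl]⟩
  obtain ⟨hge, hpref, hmin⟩ := PySem.Chars.findFrom_natCast_spec s ['$'] (p + 15) hk hne
  rw [pvJ_chars]
  set j := PySem.Chars.findFrom s ['$'] ((p + 15 : Nat) : Int) none with hj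
  have hj0 : 0 ≤ j := le_trans (by positivity) hge
  have hjn : (j.toNat : Int) = j := Int.toNat_of_nonneg hj0
  have hgen : p + 15 ≤ j.toNat := by omega
  have hle : j.toNat ≤ p + 15 + m := by
    by_contra hgt
    exact hmin (p + 15 + m) (by omega) (by omega) hdollar
  have hge2 : p + 15 + m ≤ j.toNat := by
    by_contra hlt
    exact pvNoDollarAt s p c j.toNat htag hgen (by omega) hpref
  have hjt : j.toNat = p + 15 + m := by omega
  rw [← hjn, hjt]

lemma pvSlice_toList (content : String) (a b : Nat) :
    (PySem.Str.slice content (some (a : Int)) (some (b : Int))).toList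
      = List.take (b - a) (List.drop a content.toList) := by
  rw [PySem.Str.toList_slice, PySem.Chars.slice_eq_listSlice,
      PySem.List.slice_toNat content.toList (by positivity) (by positivity)]
  simp

lemma pvCond_p15 (content : String) (p : Nat) (h : pvCond content p = true) :
    p + 15 ≤ content.toList.length := by
  obtain ⟨h1, -⟩ := (pvCond_iff content p).mp h
  rw [beq_iff_eq] at h1
  have := congrArg String.toList h1
  rw [show ((p : Int) + 15) = ((p + 15 : Nat) : Int) from by push_cast; ring,
      pvSlice_toList content p (p + 15)] at this
  have hl := congrArg List.length this
  rw [List.length_take, List.length_drop] at hl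
  rw [show ((p + 15 : Nat)) - p = 15 from by omega] at hl
  rw [show ("$drafto_restore".toList).length = 15 from rfl] at hl
  omega

lemma pvMem_scan (content : String) (c : Nat) :
    ("$" ++ pvName c ++ "$") ∈ pvScanB content ↔ pvPresent content.toList c := by
  set s := content.toList with hs
  rw [pvMem_scan_fold]
  constructor
  · rintro ⟨p, hp, hcond, hx⟩
    rw [pvPresent_iff_exists]
    refine ⟨p, ?_⟩
    have hk := pvCond_p15 content p hcond
    have hne : PySem.Chars.findFrom s ['$'] ((p + 15 : Nat) : Int) none ≠ -1 := by
      rw [← pvJ_chars]; exact ((pvCond_iff content p).mp hcond).2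
    obtain ⟨hge, -, -⟩ := PySem.Chars.findFrom_natCast_spec s ['$'] (p + 15) hk hne
    have hj0 : 0 ≤ pvJ content p := by
      rw [pvJ_chars]; exact le_trans (by positivity) hge
    have hxl := congrArg String.toList hx
    rw [pvToList_tag, pvChunk] at hxl
    rw [show pvJ content p + 1 = (((pvJ content p).toNat + 1 : Nat) : Int) from by
          rw [Int.natCast_add, Int.toNat_of_nonneg hj0]; simp,
        pvSlice_toList content p ((pvJ content p).toNat + 1)] at hxl
    rw [hxl]
    exact List.take_prefix _ _
  · intro hpres
    obtain ⟨p, htag⟩ := (pvPresent_iff_exists s c).mp hpres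
    have hlenle := htag.length_le
    rw [pvTag_length, List.length_drop] at hlenle
    have hlen : p + 16 + (pvMid c).length ≤ s.length := by omega
    have hpL : p < s.length := by omega
    have hJ := pvJ_eq content p c htag hlen
    refine ⟨p, List.mem_range.mpr hpL, (pvCond_iff content p).mpr ⟨?_, ?_⟩, ?_⟩
    · -- the slice at p equals the marker
      rw [beq_iff_eq, ← String.toList_inj,
          show ((p : Int) + 15) = ((p + 15 : Nat) : Int) from by push_cast; ring,
          pvSlice_toList content p (p + 15)]
      have hmark : pvMarker <+: List.drop p s := by
        rw [pvTag_eq] at htag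
        exact (List.prefix_append _ _).trans htag
      have := List.prefix_iff_eq_take.mp hmark
      rw [show pvMarker.length = 15 from rfl] at this
      rw [show p + 15 - p = 15 from by omega, ← this]
      rfl
    · rw [hJ]
      intro hc
      omega
    · rw [← String.toList_inj, pvToList_tag, pvChunk, hJ,
          show ((p + 15 + (pvMid c).length : Nat) : Int) + 1
              = ((p + 16 + (pvMid c).length : Nat) : Int) from by push_cast; ring,
          pvSlice_toList content p (p + 16 + (pvMid c).length)]
      have := List.prefix_iff_eq_take.mp htag
      rw [pvTag_length] at this
      rw [show p + 16 + (pvMid c).length - p = 16 + (pvMid c).length from by omega]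
      exact this

-- ===== VERDICT (by name: the statement is the Claim_ definition above) =====
theorem make_dollar_tag_spec : Claim_equal_make_dollar_tag := by
  intro content _
  unfold Spec_make_dollar_tag make_dollar_tag make_dollar_tag_alt
  obtain ⟨N, hNle, hpres, habs⟩ := pvExists_N content.toList
  have hmem : ∀ c : Nat, (("$" ++ pvName c ++ "$") ∈ pvScanB content ↔ pvPresent content.toList c) :=
    fun c => pvMem_scan content c
  have hA := pvLoopA_spec content N hpres habs (content.toList.length + 1) 0
    (Nat.zero_le N) (by omega)
  have hB := pvLoopB_spec (pvScanB content) content N hmem hpres habs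
    (content.toList.length + 1) 0 (Nat.zero_le N) (by omega)
  simpa [pvName] using hA.trans hB.symm
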